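-- pv_equiv track=rewrite | github.com/kcortes133/Assignment_1 | main.py | makeNetwork
-- ===== SOURCE A (Python) =====
-- def makeNetwork(genes, interactionsNetwork):
--     geneInteractions = {}
--     for gene1 in genes:
--         # input gene1 check if connected to any other gene
--         geneInteractions[gene1] = {}
--         for gene2 in genes:
--             if gene1 in interactionsNetwork:
--                 if gene2 in interactionsNetwork[gene1]:
--                     if gene2 in geneInteractions:
--                         # make sure not to duplicate edges
--                         if gene1 not in geneInteractions[gene2]:
--                             geneInteractions[gene1][gene2] = interactionsNetwork[gene1][gene2]
--     return geneInteractions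
-- ===== SOURCE B (Python) =====
-- def makeNetwork(genes, interactionsNetwork):
--     # One pass over each gene's actual neighbor list instead of genes x genes:
--     # a neighbor g2 joins g's row iff it was already seen, rows are ordered by
--     # first position in genes (restored by a per-row sort of the few neighbors).
--     first = {}
--     for i, g in enumerate(genes):
--         first.setdefault(g, i)
--     result = {}
--     seen = set()
--     for g in genes:
--         seen.add(g)
--         nbrs = interactionsNetwork.get(g, {})
--         row = sorted((g2 for g2 in nbrs if g2 in seen), key=lambda g2: first[g2])
--         d = {}
--         result[g] = d
--         for g2 in row:
--             if g not in result[g2]: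
--                 d[g2] = nbrs[g2]
--     return result
-- ===== Notes on version B (the rewrite author's own statement) =====
-- stated objective: faster
-- what changed: Instead of A's genes-by-genes double loop, B records each gene's first position once, then for each gene filters its actual neighbor list against a seen-set and sorts that short row by first position, applying the duplicate-edge check only to those few candidates.
import Mathlib
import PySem

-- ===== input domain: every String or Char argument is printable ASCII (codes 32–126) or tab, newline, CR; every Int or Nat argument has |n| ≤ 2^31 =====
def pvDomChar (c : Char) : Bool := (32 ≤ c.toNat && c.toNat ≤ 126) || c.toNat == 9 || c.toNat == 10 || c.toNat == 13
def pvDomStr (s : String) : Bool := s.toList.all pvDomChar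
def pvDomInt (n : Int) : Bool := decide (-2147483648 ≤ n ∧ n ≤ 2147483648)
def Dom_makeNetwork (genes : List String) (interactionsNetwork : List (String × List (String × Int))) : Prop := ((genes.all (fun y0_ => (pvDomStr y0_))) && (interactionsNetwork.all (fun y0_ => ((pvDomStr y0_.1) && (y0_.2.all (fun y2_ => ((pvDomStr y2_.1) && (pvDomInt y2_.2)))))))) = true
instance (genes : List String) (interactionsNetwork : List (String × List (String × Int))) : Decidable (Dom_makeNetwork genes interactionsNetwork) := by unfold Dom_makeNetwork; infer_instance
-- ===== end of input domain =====

-- B replaces A's genes×genes double scan by one pass over each gene's actual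
-- neighbor list (first-position dict built once; a per-row sort restores genes order).

-- ===== PORT A =====
-- literal transliteration of A; 'interactionsNetwork[gene1]' is evaluated only under the
-- 'gene1 in interactionsNetwork' guard, so 'getD … []' is exact there
def makeNetwork (genes : List String) (interactionsNetwork : List (String × List (String × Int))) : List (String × List (String × Int)) :=
  let nw : PySem.Dict String (List (String × Int)) := PySem.Dict.ofList interactionsNetwork
  let gi : PySem.Dict String (PySem.Dict String Int) :=
    genes.foldl (fun gi gene1 =>
      genes.foldl (fun gi gene2 =>
        if nw.contains gene1 then
          if (PySem.Dict.ofList (nw.getD gene1 [])).contains gene2 then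
            if gi.contains gene2 then
              if (gi.getD gene2 PySem.Dict.empty).contains gene1 = false then
                gi.insert gene1 ((gi.getD gene1 PySem.Dict.empty).insert gene2
                  ((PySem.Dict.ofList (nw.getD gene1 [])).getD gene2 0))
              else gi
            else gi
          else gi
        else gi) (gi.insert gene1 PySem.Dict.empty)) PySem.Dict.empty
  gi.items.map (fun p => (p.1, p.2.items))

-- ===== PORT B =====
-- literal transliteration of Source B; python's 'd = {}; result[g] = d' aliases d and result[g],
-- so lookups 'result[g2]' during the row loop are ported as '(res.insert g d).getD g2';
-- 'result[g2]' / 'first[g2]' are evaluated only for already-seen g2, so 'getD' is exact there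
def makeNetwork_alt (genes : List String) (interactionsNetwork : List (String × List (String × Int))) : List (String × List (String × Int)) :=
  let first : PySem.Dict String Int :=
    (PySem.List.enumerate genes 0).foldl (fun d p => d.setdefault p.2 p.1) PySem.Dict.empty
  let nw : PySem.Dict String (List (String × Int)) := PySem.Dict.ofList interactionsNetwork
  let res : PySem.Dict String (PySem.Dict String Int) × PySem.Set String :=
    genes.foldl (fun (st : PySem.Dict String (PySem.Dict String Int) × PySem.Set String) g =>
      let seen := PySem.Set.add st.2 g
      let nbrs := PySem.Dict.ofList (nw.getD g [])
      let row := PySem.List.sorted (nbrs.keys.filter (fun g2 => seen.contains g2))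
        (fun g2 => first.getD g2 0) false
      let d := row.foldl (fun d g2 =>
          if ((st.1.insert g d).getD g2 PySem.Dict.empty).contains g = false then
            d.insert g2 (nbrs.getD g2 0)
          else d) PySem.Dict.empty
      (st.1.insert g d, seen)) (PySem.Dict.empty, PySem.Set.empty)
  res.1.items.map (fun p => (p.1, p.2.items))

-- ===== PRECONDITION & SPEC =====
def Spec_makeNetwork (genes : List String) (interactionsNetwork : List (String × List (String × Int))) (out : List (String × List (String × Int))) : Prop := out = makeNetwork_alt genes interactionsNetwork
instance (genes : List String) (interactionsNetwork : List (String × List (String × Int))) (out : List (String × List (String × Int))) : Decidable (Spec_makeNetwork genes interactionsNetwork out) := by unfold Spec_makeNetwork; infer_instance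

-- ===== CLAIM (what is proved, stated in full; the proofs are below) =====
def Claim_equal_makeNetwork : Prop := ∀ (genes : List String) (interactionsNetwork : List (String × List (String × Int))), Dom_makeNetwork genes interactionsNetwork → Spec_makeNetwork genes interactionsNetwork (makeNetwork genes interactionsNetwork)

-- ===== LEMMAS AND PROOFS =====
-- proof-side definitions

def pvFirst (genes : List String) : PySem.Dict String Int :=
  (PySem.List.enumerate genes 0).foldl (fun d p => d.setdefault p.2 p.1) PySem.Dict.empty

def pvInner (nw : PySem.Dict String (List (String × Int))) (g : String) : PySem.Dict String Int :=
  PySem.Dict.ofList (nw.getD g [])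

def pvPair (nw : PySem.Dict String (List (String × Int))) (g : String) : String → String × Int :=
  fun g2 => (g2, (pvInner nw g).getD g2 0)

def pvCond (nw : PySem.Dict String (List (String × Int)))
    (D0 : PySem.Dict String (PySem.Dict String Int)) (g g2 : String) : Bool :=
  (pvInner nw g).contains g2 && (g2 == g || D0.contains g2) &&
    (g2 == g || !((D0.getD g2 PySem.Dict.empty).contains g))

def pvRowP (nw : PySem.Dict String (List (String × Int)))
    (D0 : PySem.Dict String (PySem.Dict String Int)) (g : String) (p0 : List String) :
    PySem.Dict String Int :=
  PySem.Dict.mk (((PySem.Set.ofList p0).filter (pvCond nw D0 g)).map (pvPair nw g))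

-- ============ generic dict/set facts ============
lemma pv_insert_self (d : PySem.Dict String Int) (k : String) (v : Int)
    (hnd : d.keys.Nodup) (hm : (k, v) ∈ d.items) : d.insert k v = d := by
  apply PySem.Dict.ext
  rw [PySem.Dict.items_insert_of_contains _ _
    ((PySem.Dict.contains_iff_mem_keys _ _).mpr (PySem.Dict.mem_keys_of_mem_items d (p := (k, v)) hm))]
  have h : ∀ p ∈ d.items, (if (p.1 == k) = true then (k, v) else p) = p := by
    intro p hp
    by_cases hh : p.1 = k
    · have h1 : d.get? k = some v := PySem.Dict.get?_of_mem_items _ hm hnd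
      have h2 : d.get? p.1 = some p.2 := PySem.Dict.get?_of_mem_items _ hp hnd
      rw [hh, h1] at h2
      have hv : v = p.2 := Option.some_inj.mp h2
      rw [if_pos (by simp [hh]), ← hh, hv]
    · simp [hh]
  rw [List.map_congr_left h, List.map_id']

lemma pvSet_append_singleton (l : List String) (x : String) :
    PySem.Set.ofList (l ++ [x]) = PySem.Set.add (PySem.Set.ofList l) x := by
  rw [PySem.Set.ofList_append]; rfl

lemma pvSet_pairwise (l : List String) :
    (PySem.Set.ofList l).Pairwise (fun a b => l.idxOf a < l.idxOf b) := by
  induction l using List.reverseRecOn with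
  | nil => simp [PySem.Set.ofList]
  | append_singleton l x ih =>
    rw [pvSet_append_singleton]
    have htrans : (PySem.Set.ofList l).Pairwise (fun a b => (l ++ [x]).idxOf a < (l ++ [x]).idxOf b) := by
      refine ih.imp_of_mem ?_
      intro a b ha hb h
      rw [List.idxOf_append_of_mem ((PySem.Set.mem_ofList l a).mp ha),
        List.idxOf_append_of_mem ((PySem.Set.mem_ofList l b).mp hb)]
      exact h
    by_cases hx : PySem.Set.contains (PySem.Set.ofList l) x = true
    · rw [show PySem.Set.add (PySem.Set.ofList l) x = PySem.Set.ofList l by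
        unfold PySem.Set.add; rw [hx]; rfl]
      exact htrans
    · rw [Bool.not_eq_true] at hx
      rw [show PySem.Set.add (PySem.Set.ofList l) x = PySem.Set.ofList l ++ [x] by
        unfold PySem.Set.add; rw [hx]; rfl]
      rw [List.pairwise_append]
      refine ⟨htrans, by simp, ?_⟩
      intro a ha b hb
      have hal : a ∈ l := (PySem.Set.mem_ofList l a).mp ha
      have hxl : x ∉ l := by
        intro hmem
        have : (PySem.Set.ofList l).contains x = true :=
          List.contains_iff_mem.mpr ((PySem.Set.mem_ofList l x).mpr hmem)
        rw [this] at hx; exact Bool.true_eq_false.mp hx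
      rw [List.mem_singleton] at hb
      subst hb
      rw [List.idxOf_append_of_mem hal, List.idxOf_append, if_neg hxl, List.idxOf_cons_self]
      have := List.idxOf_lt_length_of_mem hal
      omega

-- strictly key-increasing rearrangements are unique
lemma pv_eq_of_perm_pairwise {κ : Type} [LinearOrder κ] (X Y : List String) (key : String → κ)
    (hperm : X.Perm Y) (hX : X.Pairwise (fun a b => key a < key b))
    (hY : Y.Pairwise (fun a b => key a < key b)) : X = Y := by
  have h1 : PySem.List.sorted Y key = X := PySem.List.sorted_eq_of_perm_of_pairwise_lt Y X key hperm hX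
  have h2 : PySem.List.sorted Y key = Y := PySem.List.sorted_eq_self_of_pairwise Y key (hY.imp le_of_lt)
  rw [← h1, h2]

-- ============ the first-occurrence dict ============
lemma pvFirst_preserve : ∀ (l : List String) (s : Int) (d : PySem.Dict String Int) (k : String),
    d.contains k = true →
    ((PySem.List.enumerate l s).foldl (fun d p => d.setdefault p.2 p.1) d).get? k = d.get? k := by
  intro l
  induction l with
  | nil => intro s d k _; simp [PySem.List.enumerate]
  | cons g gs ih =>
    intro s d k hc
    rw [PySem.List.enumerate_cons, List.foldl_cons]
    by_cases hkg : k = g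
    · subst hkg
      rw [PySem.Dict.setdefault_of_contains _ _ hc]
      exact ih (s + 1) d _ hc
    · rw [ih (s + 1) _ k (by
        by_cases hgc : d.contains g = true
        · rw [PySem.Dict.setdefault_of_contains _ _ hgc]; exact hc
        · rw [PySem.Dict.setdefault_of_not_contains _ _ (by simpa using hgc),
            PySem.Dict.contains_insert]
          simp [hc])]
      exact PySem.Dict.get?_setdefault_of_ne _ _ hkg

lemma pvFirst_idx : ∀ (l : List String) (s : Int) (d : PySem.Dict String Int) (k : String),
    d.contains k = false → k ∈ l →
    ((PySem.List.enumerate l s).foldl (fun d p => d.setdefault p.2 p.1) d).getD k 0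
      = s + (l.idxOf k : Int) := by
  intro l
  induction l with
  | nil => intro s d k _ h; simp at h
  | cons g gs ih =>
    intro s d k hc hmem
    rw [PySem.List.enumerate_cons, List.foldl_cons]
    by_cases hkg : k = g
    · subst hkg
      have hset : d.setdefault k s = d.insert k s := PySem.Dict.setdefault_of_not_contains _ _ hc
      rw [hset]
      have hpres := pvFirst_preserve gs (s + 1) (d.insert k s) k
        (by rw [PySem.Dict.contains_insert]; simp)
      rw [PySem.Dict.getD_eq_get?_getD, hpres, PySem.Dict.get?_insert_self]
      simp [List.idxOf_cons_self]
    · have hmem' : k ∈ gs := by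
        rcases List.mem_cons.mp hmem with h | h
        · exact absurd h hkg
        · exact h
      have hc' : (d.setdefault g s).contains k = false := by
        by_cases hgc : d.contains g = true
        · rw [PySem.Dict.setdefault_of_contains _ _ hgc]; exact hc
        · rw [PySem.Dict.setdefault_of_not_contains _ _ (by simpa using hgc),
            PySem.Dict.contains_insert]
          simp [hc, hkg]
      rw [ih (s + 1) _ k hc' hmem', List.idxOf_cons_ne gs (Ne.symm hkg)]
      push_cast [Nat.succ_eq_add_one]
      ring

lemma pvFirst_getD (genes : List String) (k : String) (hk : k ∈ genes) :
    (pvFirst genes).getD k 0 = (genes.idxOf k : Int) := by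
  unfold pvFirst
  rw [pvFirst_idx genes 0 PySem.Dict.empty k (by simp) hk]
  ring

lemma pvRowP_keys (nw : PySem.Dict String (List (String × Int)))
    (gi0 : PySem.Dict String (PySem.Dict String Int)) (g : String) (p0 : List String) :
    (pvRowP nw gi0 g p0).keys = (PySem.Set.ofList p0).filter (pvCond nw gi0 g) := by
  unfold pvRowP
  rw [PySem.Dict.keys_mk, List.map_map]
  exact List.map_id' _

lemma pvRowP_contains (nw : PySem.Dict String (List (String × Int)))
    (gi0 : PySem.Dict String (PySem.Dict String Int)) (g : String) (p0 : List String) (x : String) :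
    (pvRowP nw gi0 g p0).contains x
      = decide (x ∈ (PySem.Set.ofList p0).filter (pvCond nw gi0 g)) := by
  rw [PySem.Dict.contains_eq_decide_mem_keys, pvRowP_keys]

lemma pvRowP_in (nw : PySem.Dict String (List (String × Int)))
    (gi0 : PySem.Dict String (PySem.Dict String Int)) (g g2 : String) (p0 : List String)
    (h : g2 ∈ p0) : pvRowP nw gi0 g (p0 ++ [g2]) = pvRowP nw gi0 g p0 := by
  unfold pvRowP
  rw [pvSet_append_singleton]
  rw [show PySem.Set.add (PySem.Set.ofList p0) g2 = PySem.Set.ofList p0 by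
    unfold PySem.Set.add
    rw [if_pos (show (PySem.Set.ofList p0).contains g2 = true from
      List.contains_iff_mem.mpr ((PySem.Set.mem_ofList p0 g2).mpr h))]]

lemma pvRowP_notin (nw : PySem.Dict String (List (String × Int)))
    (gi0 : PySem.Dict String (PySem.Dict String Int)) (g g2 : String) (p0 : List String)
    (h : g2 ∉ p0) :
    pvRowP nw gi0 g (p0 ++ [g2])
      = PySem.Dict.mk ((((PySem.Set.ofList p0).filter (pvCond nw gi0 g)).map (pvPair nw g))
          ++ (if pvCond nw gi0 g g2 then [pvPair nw g g2] else [])) := by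
  unfold pvRowP
  rw [pvSet_append_singleton]
  rw [show PySem.Set.add (PySem.Set.ofList p0) g2 = PySem.Set.ofList p0 ++ [g2] by
    unfold PySem.Set.add
    rw [if_neg (show ¬ (PySem.Set.ofList p0).contains g2 = true from fun hc =>
      h ((PySem.Set.mem_ofList p0 g2).mp (List.contains_iff_mem.mp hc)))]]
  rw [List.filter_append, List.map_append]
  congr 1
  rw [List.filter_singleton]
  by_cases hc : pvCond nw gi0 g g2 = true
  · rw [hc]; simp
  · rw [Bool.not_eq_true] at hc; rw [hc]; simp

lemma pvRowP_false (nw : PySem.Dict String (List (String × Int)))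
    (gi0 : PySem.Dict String (PySem.Dict String Int)) (g g2 : String) (p0 : List String)
    (h : pvCond nw gi0 g g2 = false) :
    pvRowP nw gi0 g (p0 ++ [g2]) = pvRowP nw gi0 g p0 := by
  by_cases hm : g2 ∈ p0
  · exact pvRowP_in nw gi0 g g2 p0 hm
  · rw [pvRowP_notin nw gi0 g g2 p0 hm, h]
    simp [pvRowP]

lemma pvRowP_add (nw : PySem.Dict String (List (String × Int)))
    (gi0 : PySem.Dict String (PySem.Dict String Int)) (g g2 : String) (p0 : List String)
    (h : g2 ∉ p0) (hc : pvCond nw gi0 g g2 = true) :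
    pvRowP nw gi0 g (p0 ++ [g2]) = (pvRowP nw gi0 g p0).insert g2 ((pvInner nw g).getD g2 0) := by
  rw [pvRowP_notin nw gi0 g g2 p0 h, hc]
  have hnc : (pvRowP nw gi0 g p0).contains g2 = false := by
    rw [pvRowP_contains]
    simp only [decide_eq_false_iff_not]
    intro hmem
    exact h ((PySem.Set.mem_ofList p0 g2).mp (List.mem_of_mem_filter hmem))
  apply PySem.Dict.ext
  rw [PySem.Dict.items_insert_of_not_contains _ _ hnc]
  rfl

lemma pv_inner_loop (nw : PySem.Dict String (List (String × Int)))
    (gi0 : PySem.Dict String (PySem.Dict String Int)) (g : String) :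
    ∀ (L p0 : List String),
    L.foldl (fun gi gene2 =>
        if nw.contains g then
          if (PySem.Dict.ofList (nw.getD g [])).contains gene2 then
            if gi.contains gene2 then
              if (gi.getD gene2 PySem.Dict.empty).contains g = false then
                gi.insert g ((gi.getD g PySem.Dict.empty).insert gene2
                  ((PySem.Dict.ofList (nw.getD g [])).getD gene2 0))
              else gi
            else gi
          else gi
        else gi)
      (gi0.insert g (pvRowP nw gi0 g p0))
    = gi0.insert g (pvRowP nw gi0 g (p0 ++ L)) := by
  intro L
  induction L with
  | nil => intro p0; simp
  | cons g2 L' ih =>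
    intro p0
    simp only [List.foldl_cons]
    have hstep : (if nw.contains g then
          if (PySem.Dict.ofList (nw.getD g [])).contains g2 then
            if (gi0.insert g (pvRowP nw gi0 g p0)).contains g2 then
              if ((gi0.insert g (pvRowP nw gi0 g p0)).getD g2 PySem.Dict.empty).contains g = false then
                (gi0.insert g (pvRowP nw gi0 g p0)).insert g
                  (((gi0.insert g (pvRowP nw gi0 g p0)).getD g PySem.Dict.empty).insert g2
                    ((PySem.Dict.ofList (nw.getD g [])).getD g2 0))
              else gi0.insert g (pvRowP nw gi0 g p0)
            else gi0.insert g (pvRowP nw gi0 g p0)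
          else gi0.insert g (pvRowP nw gi0 g p0)
        else gi0.insert g (pvRowP nw gi0 g p0))
        = gi0.insert g (pvRowP nw gi0 g (p0 ++ [g2])) := by
      by_cases hc : nw.contains g = true
      case neg =>
        rw [if_neg hc]
        have hinner : (pvInner nw g).contains g2 = false := by
          unfold pvInner
          rw [PySem.Dict.getD_of_not_contains nw [] (by simpa using hc)]
          simp [PySem.Dict.ofList, PySem.Dict.update]
        rw [pvRowP_false nw gi0 g g2 p0 (by unfold pvCond; simp [hinner])]
      case pos =>
        rw [if_pos hc]
        by_cases hin : (pvInner nw g).contains g2 = true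
        case neg =>
          rw [if_neg (show ¬ (PySem.Dict.ofList (nw.getD g [])).contains g2 = true from hin)]
          rw [pvRowP_false nw gi0 g g2 p0 (by unfold pvCond; simp [show (pvInner nw g).contains g2 = false by simpa using hin])]
        case pos =>
          rw [if_pos (show (PySem.Dict.ofList (nw.getD g [])).contains g2 = true from hin)]
          have hscont : (gi0.insert g (pvRowP nw gi0 g p0)).contains g2
              = (g2 == g || gi0.contains g2) := PySem.Dict.contains_insert _ _ _ _
          by_cases hseen : (g2 == g || gi0.contains g2) = true
          case neg =>
            rw [if_neg (by rw [hscont]; exact hseen)]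
            rw [pvRowP_false nw gi0 g g2 p0 (by
              unfold pvCond
              rw [show (g2 == g || gi0.contains g2) = false by simpa using hseen]
              simp)]
          case pos =>
            rw [if_pos (by rw [hscont]; exact hseen)]
            by_cases h2g : g2 = g
            · subst h2g
              rw [PySem.Dict.getD_insert_self]
              by_cases hgp : g2 ∈ (PySem.Set.ofList p0).filter (pvCond nw gi0 g2)
              · rw [if_neg (by
                  rw [pvRowP_contains]
                  simp [hgp])]
                rw [pvRowP_in nw gi0 g2 g2 p0 ((PySem.Set.mem_ofList p0 g2).mp (List.mem_of_mem_filter hgp))]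
              · rw [if_pos (by rw [pvRowP_contains]; simp [hgp])]
                rw [PySem.Dict.insert_insert_self]
                have hcond : pvCond nw gi0 g2 g2 = true := by
                  unfold pvCond; simp [hin]
                have hnp0 : g2 ∉ p0 := by
                  intro hmem
                  exact hgp (List.mem_filter.mpr ⟨(PySem.Set.mem_ofList p0 g2).mpr hmem, hcond⟩)
                rw [pvRowP_add nw gi0 g2 g2 p0 hnp0 hcond]
                rfl
            · rw [PySem.Dict.getD_insert, if_neg h2g]
              by_cases hbk : (gi0.getD g2 PySem.Dict.empty).contains g = true
              · rw [if_neg (by simp [hbk])]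
                rw [pvRowP_false nw gi0 g g2 p0 (by
                  unfold pvCond
                  rw [show (g2 == g) = false by simp [h2g], hbk]
                  simp)]
              · rw [if_pos (by simpa using hbk)]
                rw [PySem.Dict.getD_insert_self, PySem.Dict.insert_insert_self]
                have hcond : pvCond nw gi0 g g2 = true := by
                  unfold pvCond
                  rw [show (gi0.getD g2 PySem.Dict.empty).contains g = false by simpa using hbk]
                  simp [hin, hseen]
                by_cases hmem : g2 ∈ p0
                · have hitems : (g2, (PySem.Dict.ofList (nw.getD g [])).getD g2 0) ∈ (pvRowP nw gi0 g p0).items := by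
                    unfold pvRowP
                    exact List.mem_map.mpr ⟨g2,
                      List.mem_filter.mpr ⟨(PySem.Set.mem_ofList p0 g2).mpr hmem, hcond⟩, rfl⟩
                  rw [pv_insert_self _ _ _ (by
                    rw [pvRowP_keys]
                    exact List.Nodup.filter _ (PySem.Set.nodup_ofList p0)) hitems]
                  rw [pvRowP_in nw gi0 g g2 p0 hmem]
                · rw [pvRowP_add nw gi0 g g2 p0 hmem hcond]
                  rfl
    rw [hstep]
    have h := ih (p0 ++ [g2])
    rw [List.append_assoc] at h
    exact h

lemma pv_b_fold (nw : PySem.Dict String (List (String × Int)))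
    (res : PySem.Dict String (PySem.Dict String Int)) (g : String) :
    ∀ (L p0 : List String), (p0 ++ L).Nodup →
    L.foldl (fun d g2 =>
        if ((res.insert g d).getD g2 PySem.Dict.empty).contains g = false then
          d.insert g2 ((PySem.Dict.ofList (nw.getD g [])).getD g2 0)
        else d)
      (PySem.Dict.mk ((p0.filter (fun g2 => g2 == g || !((res.getD g2 PySem.Dict.empty).contains g))).map (pvPair nw g)))
    = PySem.Dict.mk (((p0 ++ L).filter (fun g2 => g2 == g || !((res.getD g2 PySem.Dict.empty).contains g))).map (pvPair nw g)) := by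
  intro L
  induction L with
  | nil => intro p0 _; simp
  | cons g2 L' ih =>
    intro p0 hnd
    simp only [List.foldl_cons]
    have hg2p0 : g2 ∉ p0 := by
      have h := (List.nodup_append.mp hnd).2.2
      exact fun hmem => h g2 hmem g2 (by simp) rfl
    have hdcont : (PySem.Dict.mk ((p0.filter (fun g2 => g2 == g || !((res.getD g2 PySem.Dict.empty).contains g))).map (pvPair nw g))).contains g2 = false := by
      rw [PySem.Dict.contains_mk, List.any_map, List.any_eq_false]
      intro x hx
      have hxp0 : x ∈ p0 := (List.mem_filter.mp hx).1
      simp only [Function.comp_apply, Bool.not_eq_true, beq_eq_false_iff_ne, ne_eq]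
      exact fun he => hg2p0 (he ▸ hxp0)
    have hstep : (if ((res.insert g (PySem.Dict.mk ((p0.filter (fun g2 => g2 == g || !((res.getD g2 PySem.Dict.empty).contains g))).map (pvPair nw g)))).getD g2 PySem.Dict.empty).contains g = false then
          (PySem.Dict.mk ((p0.filter (fun g2 => g2 == g || !((res.getD g2 PySem.Dict.empty).contains g))).map (pvPair nw g))).insert g2
            ((PySem.Dict.ofList (nw.getD g [])).getD g2 0)
        else PySem.Dict.mk ((p0.filter (fun g2 => g2 == g || !((res.getD g2 PySem.Dict.empty).contains g))).map (pvPair nw g)))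
        = PySem.Dict.mk (((p0 ++ [g2]).filter (fun g2 => g2 == g || !((res.getD g2 PySem.Dict.empty).contains g))).map (pvPair nw g)) := by
      by_cases h2g : g2 = g
      · subst h2g
        rw [PySem.Dict.getD_insert_self, if_pos (by simpa using hdcont)]
        apply PySem.Dict.ext
        rw [PySem.Dict.items_insert_of_not_contains _ _ hdcont, List.filter_append,
          List.filter_singleton, List.map_append]
        simp [pvPair, pvInner]
      · rw [PySem.Dict.getD_insert, if_neg h2g]
        by_cases hbk : (res.getD g2 PySem.Dict.empty).contains g = true
        · rw [if_neg (by simp [hbk])]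
          rw [List.filter_append, List.filter_singleton]
          rw [show (g2 == g || !((res.getD g2 PySem.Dict.empty).contains g)) = false by
            simp [h2g, hbk]]
          simp
        · rw [if_pos (by simpa using hbk)]
          apply PySem.Dict.ext
          rw [PySem.Dict.items_insert_of_not_contains _ _ hdcont, List.filter_append,
            List.filter_singleton, List.map_append]
          rw [show (g2 == g || !((res.getD g2 PySem.Dict.empty).contains g)) = true by
            simp [show (res.getD g2 PySem.Dict.empty).contains g = false by simpa using hbk]]
          simp [pvPair, pvInner]
    rw [hstep]
    have h := ih (p0 ++ [g2]) (by simpa using hnd)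
    rw [List.append_assoc] at h
    exact h

lemma pv_prefix_pairwise (genes pre rest : List String) (g : String)
    (hsplit : genes = pre ++ g :: rest) :
    (PySem.Set.ofList (pre ++ [g])).Pairwise
      (fun a b => (genes.idxOf a : Int) < (genes.idxOf b : Int)) := by
  have hg : genes = (pre ++ [g]) ++ rest := by rw [hsplit]; simp
  refine (pvSet_pairwise (pre ++ [g])).imp_of_mem ?_
  intro a b ha hb h
  have ha' : a ∈ pre ++ [g] := (PySem.Set.mem_ofList _ a).mp ha
  have hb' : b ∈ pre ++ [g] := (PySem.Set.mem_ofList _ b).mp hb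
  rw [hg, List.idxOf_append_of_mem ha', List.idxOf_append_of_mem hb']
  exact_mod_cast h

lemma pv_b_row (genes pre rest : List String) (g : String)
    (hsplit : genes = pre ++ g :: rest)
    (nw : PySem.Dict String (List (String × Int))) :
    PySem.List.sorted
      ((pvInner nw g).keys.filter (fun g2 => (PySem.Set.ofList (pre ++ [g])).contains g2))
      (fun g2 => (pvFirst genes).getD g2 0) false
    = (PySem.Set.ofList (pre ++ [g])).filter (fun g2 => (pvInner nw g).contains g2) := by
  have hg : genes = (pre ++ [g]) ++ rest := by rw [hsplit]; simp
  apply PySem.List.sorted_eq_of_perm_of_pairwise_lt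
  · rw [List.perm_ext_iff_of_nodup
      (List.Nodup.filter _ (PySem.Set.nodup_ofList _))
      (List.Nodup.filter _ (by unfold pvInner; exact PySem.Dict.nodup_keys_ofList _))]
    intro x
    simp only [List.mem_filter]
    constructor
    · rintro ⟨hs, hc⟩
      exact ⟨(PySem.Dict.contains_iff_mem_keys _ _).mp hc,
        List.contains_iff_mem.mpr hs⟩
    · rintro ⟨hk, hc⟩
      exact ⟨List.contains_iff_mem.mp hc,
        (PySem.Dict.contains_iff_mem_keys _ _).mpr hk⟩
  · have hpw := pv_prefix_pairwise genes pre rest g hsplit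
    have hpw' : ((PySem.Set.ofList (pre ++ [g])).filter (fun g2 => (pvInner nw g).contains g2)).Pairwise
        (fun a b => (genes.idxOf a : Int) < (genes.idxOf b : Int)) :=
      hpw.sublist List.filter_sublist
    refine hpw'.imp_of_mem ?_
    intro a b ha hb h
    have ha' : a ∈ genes := by
      rw [hg]
      exact List.mem_append_left _ ((PySem.Set.mem_ofList _ a).mp (List.mem_of_mem_filter ha))
    have hb' : b ∈ genes := by
      rw [hg]
      exact List.mem_append_left _ ((PySem.Set.mem_ofList _ b).mp (List.mem_of_mem_filter hb))
    rw [pvFirst_getD genes a ha', pvFirst_getD genes b hb']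
    exact h

lemma pv_rows_eq (genes pre rest : List String) (g : String)
    (hsplit : genes = pre ++ g :: rest)
    (nw : PySem.Dict String (List (String × Int)))
    (gi : PySem.Dict String (PySem.Dict String Int))
    (hkeys : gi.keys = PySem.Set.ofList pre) :
    ((PySem.Set.ofList (pre ++ [g])).filter (fun g2 => (pvInner nw g).contains g2)).filter
      (fun g2 => g2 == g || !((gi.getD g2 PySem.Dict.empty).contains g))
    = (PySem.Set.ofList genes).filter (pvCond nw gi g) := by
  have hg : genes = (pre ++ [g]) ++ rest := by rw [hsplit]; simp
  have hgicont : ∀ x, gi.contains x = decide (x ∈ pre) := by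
    intro x
    rw [PySem.Dict.contains_eq_decide_mem_keys, hkeys]
    by_cases hx : x ∈ pre
    · simp [hx, (PySem.Set.mem_ofList pre x).mpr hx]
    · simp [hx]
  apply pv_eq_of_perm_pairwise _ _ (fun g2 => (genes.idxOf g2 : Int))
  · rw [List.perm_ext_iff_of_nodup
      (List.Nodup.filter _ (List.Nodup.filter _ (PySem.Set.nodup_ofList _)))
      (List.Nodup.filter _ (PySem.Set.nodup_ofList _))]
    intro x
    simp only [List.mem_filter, PySem.Set.mem_ofList, Bool.or_eq_true,
      Bool.not_eq_true', beq_iff_eq]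
    unfold pvCond
    simp only [Bool.or_eq_true, Bool.and_eq_true, Bool.not_eq_true', beq_iff_eq]
    constructor
    · rintro ⟨⟨hmem, hin⟩, hok⟩
      refine ⟨by rw [hg]; exact List.mem_append_left _ hmem, ⟨hin, ?_⟩, hok⟩
      rcases List.mem_append.mp hmem with h | h
      · right; rw [hgicont]; simpa using h
      · left; simpa using h
    · rintro ⟨hmem, ⟨hin, hseen⟩, hok⟩
      refine ⟨⟨?_, hin⟩, hok⟩
      rcases hseen with h | h
      · exact List.mem_append_right _ (by simp [h])
      · rw [hgicont] at h
        exact List.mem_append_left _ (by simpa using h)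
  · exact (pv_prefix_pairwise genes pre rest g hsplit).sublist
      (List.Sublist.trans List.filter_sublist List.filter_sublist)
  · exact (pvSet_pairwise genes).imp_of_mem (by
      intro a b _ _ h
      exact_mod_cast h) |>.sublist List.filter_sublist

lemma pv_main (genes : List String) (nw : PySem.Dict String (List (String × Int))) :
    ∀ (rest pre : List String) (gi : PySem.Dict String (PySem.Dict String Int))
      (seen : PySem.Set String),
    genes = pre ++ rest →
    gi.keys = PySem.Set.ofList pre →
    seen = PySem.Set.ofList pre →
    rest.foldl (fun gi gene1 =>
      genes.foldl (fun gi gene2 =>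
        if nw.contains gene1 then
          if (PySem.Dict.ofList (nw.getD gene1 [])).contains gene2 then
            if gi.contains gene2 then
              if (gi.getD gene2 PySem.Dict.empty).contains gene1 = false then
                gi.insert gene1 ((gi.getD gene1 PySem.Dict.empty).insert gene2
                  ((PySem.Dict.ofList (nw.getD gene1 [])).getD gene2 0))
              else gi
            else gi
          else gi
        else gi) (gi.insert gene1 PySem.Dict.empty)) gi
    = (rest.foldl (fun (st : PySem.Dict String (PySem.Dict String Int) × PySem.Set String) g =>
        (st.1.insert g ((PySem.List.sorted
            ((PySem.Dict.ofList (nw.getD g [])).keys.filter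
              (fun g2 => (PySem.Set.add st.2 g).contains g2))
            (fun g2 => (pvFirst genes).getD g2 0) false).foldl
          (fun d g2 =>
            if ((st.1.insert g d).getD g2 PySem.Dict.empty).contains g = false then
              d.insert g2 ((PySem.Dict.ofList (nw.getD g [])).getD g2 0)
            else d) PySem.Dict.empty),
         PySem.Set.add st.2 g)) (gi, seen)).1 := by
  intro rest
  induction rest with
  | nil => intro pre gi seen _ _ _; rfl
  | cons g rest' ih =>
    intro pre gi seen hsplit hkeys hseen
    simp only [List.foldl_cons]
    -- A's step
    have e0 : gi.insert g PySem.Dict.empty = gi.insert g (pvRowP nw gi g []) := rfl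
    have hA := pv_inner_loop nw gi g genes []
    rw [List.nil_append] at hA
    -- B's step
    have hseen' : PySem.Set.add seen g = PySem.Set.ofList (pre ++ [g]) := by
      rw [hseen, pvSet_append_singleton]
    have hrow := pv_b_row genes pre rest' g hsplit nw
    have hY : ((PySem.Set.ofList (pre ++ [g])).filter (fun g2 => (pvInner nw g).contains g2)).Nodup :=
      List.Nodup.filter _ (PySem.Set.nodup_ofList _)
    have hfold := pv_b_fold nw gi g
      ((PySem.Set.ofList (pre ++ [g])).filter (fun g2 => (pvInner nw g).contains g2)) []
      (by simpa using hY)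
    rw [List.nil_append] at hfold
    have hd : ((PySem.List.sorted
          ((PySem.Dict.ofList (nw.getD g [])).keys.filter
            (fun g2 => (PySem.Set.add seen g).contains g2))
          (fun g2 => (pvFirst genes).getD g2 0) false).foldl
        (fun d g2 =>
          if ((gi.insert g d).getD g2 PySem.Dict.empty).contains g = false then
            d.insert g2 ((PySem.Dict.ofList (nw.getD g [])).getD g2 0)
          else d) PySem.Dict.empty)
        = pvRowP nw gi g genes := by
      rw [hseen']
      rw [show ((PySem.Dict.ofList (nw.getD g [])).keys.filter
          (fun g2 => (PySem.Set.ofList (pre ++ [g])).contains g2))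
        = ((pvInner nw g).keys.filter (fun g2 => (PySem.Set.ofList (pre ++ [g])).contains g2)) from rfl]
      rw [hrow]
      rw [show (PySem.Dict.mk ((([] : List String).filter
          (fun g2 => g2 == g || !((gi.getD g2 PySem.Dict.empty).contains g))).map (pvPair nw g)))
        = (PySem.Dict.empty : PySem.Dict String Int) from rfl] at hfold
      rw [hfold]
      rw [pv_rows_eq genes pre rest' g hsplit nw gi hkeys]
      rfl
    rw [e0, hA, hd]
    -- recurse
    have hkeys' : (gi.insert g (pvRowP nw gi g genes)).keys = PySem.Set.ofList (pre ++ [g]) := by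
      by_cases hc : gi.contains g = true
      · rw [PySem.Dict.keys_insert_of_contains _ _ hc, hkeys, pvSet_append_singleton]
        have hmem : (PySem.Set.ofList pre).contains g = true := by
          rw [PySem.Dict.contains_eq_decide_mem_keys, hkeys] at hc
          exact List.contains_iff_mem.mpr (by simpa using hc)
        unfold PySem.Set.add
        rw [if_pos hmem]
      · rw [PySem.Dict.keys_insert_of_not_contains _ _ (by simpa using hc), hkeys,
          pvSet_append_singleton]
        have hmem : ¬ (PySem.Set.ofList pre).contains g = true := by
          intro hco
          rw [PySem.Dict.contains_eq_decide_mem_keys, hkeys] at hc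
          exact hc (by simpa using List.contains_iff_mem.mp hco)
        unfold PySem.Set.add
        rw [if_neg hmem]
    have h := ih (pre ++ [g]) (gi.insert g (pvRowP nw gi g genes)) (PySem.Set.add seen g)
      (by rw [hsplit, List.append_assoc]; rfl) hkeys' (by rw [hseen'])
    exact h

-- ===== VERDICT (by name: the statement is the Claim_ definition above) =====
theorem makeNetwork_spec : Claim_equal_makeNetwork := by
  intro genes N _
  unfold Spec_makeNetwork makeNetwork makeNetwork_alt
  have h := pv_main genes (PySem.Dict.ofList N) genes [] PySem.Dict.empty PySem.Set.empty rfl rfl rfl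
  exact congrArg (fun d => d.items.map (fun p => (p.1, p.2.items))) h
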